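-- pv_equiv track=rewrite | github.com/DandaAkhilReddy/agentchains | agents/message_translator_agent/a2a_agent.py | _tokenize_preserving_case
-- ===== SOURCE A (Python) =====
-- def _tokenize_preserving_case(text: str) -> list[str]:
--     """Split text into tokens, preserving original whitespace as separate tokens.
--
--     Punctuation attached to words is kept so that the output can be re-joined
--     faithfully. Each "word" token (alphanumeric run) is returned separately from
--     surrounding punctuation/space.
--
--     Args:
--         text: Input text string.
--
--     Returns:
--         List of token strings alternating between word-like tokens and
--         separator/punctuation tokens.
--     """
--     tokens: list[str] = []
--     current: list[str] = []
--     for ch in text: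
--         if ch.isalpha():
--             current.append(ch)
--         else:
--             if current:
--                 tokens.append("".join(current))
--                 current = []
--             tokens.append(ch)
--     if current:
--         tokens.append("".join(current))
--     return tokens
-- ===== SOURCE B (Python) =====
-- def _tokenize_preserving_case(text: str) -> list[str]:
--     """Index-based run scanner: slice out each maximal alpha run in one step,
--     emit every non-alpha character as its own token (no buffer state machine)."""
--     tokens: list[str] = []
--     i, n = 0, len(text)
--     while i < n:
--         if text[i].isalpha():
--             j = i
--             while j < n and text[j].isalpha():
--                 j += 1
--             tokens.append(text[i:j])
--             i = j
--         else:
--             tokens.append(text[i])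
--             i += 1
--     return tokens
-- ===== Notes on version B (the rewrite author's own statement) =====
-- stated objective: alternative
-- what changed: Replaced the char-by-char buffer/flush state machine with an index-based two-pointer run scanner that slices each maximal alpha run out of the string in one step and emits each non-alpha character directly.
import Mathlib
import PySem

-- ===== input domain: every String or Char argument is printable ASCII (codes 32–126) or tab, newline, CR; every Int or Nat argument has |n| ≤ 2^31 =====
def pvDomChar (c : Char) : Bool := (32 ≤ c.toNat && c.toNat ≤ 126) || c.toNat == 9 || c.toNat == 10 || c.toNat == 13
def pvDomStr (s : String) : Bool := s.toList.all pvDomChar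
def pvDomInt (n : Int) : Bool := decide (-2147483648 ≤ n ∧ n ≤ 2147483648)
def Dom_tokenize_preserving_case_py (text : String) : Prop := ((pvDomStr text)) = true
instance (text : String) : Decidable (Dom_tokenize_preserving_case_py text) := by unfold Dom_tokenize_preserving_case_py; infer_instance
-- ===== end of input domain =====

-- B replaces A's char-by-char buffer/flush state machine by an index-based run
-- scanner that slices out each maximal alpha run in one step (objective: alternative).

-- ===== PORT A =====
-- ch.isalpha() on the printable-ASCII domain = PySem.Chars.isalpha
def aLoop (cs : List Char) (tokens : List String) (current : List Char) : List String :=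
  match cs with
  | [] => if current ≠ [] then tokens ++ [String.ofList current] else tokens
  | c :: rest =>
    if PySem.Chars.isalpha c then
      aLoop rest tokens (current ++ [c])
    else
      aLoop rest ((if current ≠ [] then tokens ++ [String.ofList current] else tokens) ++ [String.ofList [c]]) []

def tokenize_preserving_case_py (text : String) : List String :=
  aLoop text.toList [] []

-- ===== PORT B =====
-- inner `while j < n and text[j].isalpha(): j += 1`
def bRunEnd (s : List Char) (n j : Nat) : Nat :=
  if h : j < n ∧ PySem.Chars.isalpha (s.getD j ' ') = true then bRunEnd s n (j + 1) else j
termination_by n - j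
decreasing_by omega

-- the port's own termination fact: the inner while never moves j backwards
theorem bRunEnd_ge (s : List Char) (n j : Nat) : j ≤ bRunEnd s n j := by
  fun_induction bRunEnd s n j with
  | case1 j h ih => omega
  | case2 j h => exact Nat.le_refl j

-- outer `while i < n` loop; text[i:j] with 0 ≤ i ≤ j is (s.drop i).take (j - i) — exact here
def bGo (s : List Char) (n i : Nat) : List String :=
  if hi : i < n then
    if ha : PySem.Chars.isalpha (s.getD i ' ') = true then
      String.ofList ((s.drop i).take (bRunEnd s n i - i)) :: bGo s n (bRunEnd s n i)
    else
      String.ofList [s.getD i ' '] :: bGo s n (i + 1)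
  else []
termination_by n - i
decreasing_by
  · have h1 : i + 1 ≤ bRunEnd s n (i + 1) := bRunEnd_ge s n (i + 1)
    have h2 : bRunEnd s n i = bRunEnd s n (i + 1) := by rw [bRunEnd]; rw [dif_pos ⟨hi, ha⟩]
    omega
  · omega

def tokenize_preserving_case_py_alt (text : String) : List String :=
  bGo text.toList text.toList.length 0

-- ===== PRECONDITION & SPEC =====
def Spec_tokenize_preserving_case_py (text : String) (out : List String) : Prop := out = tokenize_preserving_case_py_alt text
instance (text : String) (out : List String) : Decidable (Spec_tokenize_preserving_case_py text out) := by unfold Spec_tokenize_preserving_case_py; infer_instance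

-- ===== CLAIM (what is proved, stated in full; the proofs are below) =====
def Claim_equal_tokenize_preserving_case_py : Prop := ∀ (text : String), Dom_tokenize_preserving_case_py text → Spec_tokenize_preserving_case_py text (tokenize_preserving_case_py text)

-- ===== LEMMAS AND PROOFS =====
-- Common normal form: split into maximal runs of equal isalpha-key, then emit
-- alpha runs joined and non-alpha runs char by char.
def pvRuns (l : List Char) : List (Bool × List Char) :=
  match l with
  | [] => []
  | c :: cs =>
    match pvRuns cs with
    | (k, g) :: rest =>
      if PySem.Chars.isalpha c = k then (k, c :: g) :: rest
      else (PySem.Chars.isalpha c, [c]) :: (k, g) :: rest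
    | [] => [(PySem.Chars.isalpha c, [c])]

def pvEmit (g : Bool × List Char) : List String :=
  if g.1 then [String.ofList g.2] else g.2.map (fun c => String.ofList [c])

def pvE (l : List Char) : List String := (pvRuns l).flatMap pvEmit

theorem pvRuns_cons_key (c : Char) (l : List Char) :
    ∃ g rest, pvRuns (c :: l) = (PySem.Chars.isalpha c, g) :: rest := by
  unfold pvRuns
  cases h : pvRuns l with
  | nil => exact ⟨[c], [], rfl⟩
  | cons p rest =>
    obtain ⟨k, g⟩ := p
    by_cases hk : PySem.Chars.isalpha c = k
    · subst hk; exact ⟨c :: g, rest, by simp⟩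
    · exact ⟨[c], (k, g) :: rest, by simp [hk]⟩

theorem pvE_not_alpha (c : Char) (l : List Char) (hc : PySem.Chars.isalpha c = false) :
    pvE (c :: l) = String.ofList [c] :: pvE l := by
  unfold pvE
  conv_lhs => rw [pvRuns]
  cases h : pvRuns l with
  | nil => simp [pvEmit, hc]
  | cons p rest =>
    obtain ⟨k, g⟩ := p
    rw [hc]
    cases k with
    | false => simp [pvEmit]
    | true => simp [pvEmit]

theorem pvRuns_alpha_prefix (cur l : List Char) (hne : cur ≠ [])
    (hall : ∀ c ∈ cur, PySem.Chars.isalpha c = true)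
    (hl : ∀ d, l.head? = some d → PySem.Chars.isalpha d = false) :
    pvRuns (cur ++ l) = (true, cur) :: pvRuns l := by
  induction cur with
  | nil => exact absurd rfl hne
  | cons c cur ih =>
    have hc : PySem.Chars.isalpha c = true := hall c (by simp)
    cases cur with
    | nil =>
      simp only [List.singleton_append]
      cases l with
      | nil => simp [pvRuns, hc]
      | cons d l' =>
        obtain ⟨g, rest, hg⟩ := pvRuns_cons_key d l'
        have hd : PySem.Chars.isalpha d = false := hl d rfl
        rw [pvRuns, hg, hc, hd]
        simp
    | cons c' cur' =>
      have ih' := ih (by simp) (fun x hx => hall x (List.mem_cons_of_mem c hx)) 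
      rw [List.cons_append, pvRuns, ih']
      have hc' : PySem.Chars.isalpha c' = true := hall c' (by simp)
      simp [hc]

theorem pvE_alpha_prefix (cur l : List Char) (hne : cur ≠ [])
    (hall : ∀ c ∈ cur, PySem.Chars.isalpha c = true)
    (hl : ∀ d, l.head? = some d → PySem.Chars.isalpha d = false) :
    pvE (cur ++ l) = String.ofList cur :: pvE l := by
  unfold pvE
  rw [pvRuns_alpha_prefix cur l hne hall hl]
  simp [pvEmit]

-- A's loop computes the normal form
theorem aLoop_eq (cs : List Char) : ∀ (tokens : List String) (cur : List Char),
    (∀ c ∈ cur, PySem.Chars.isalpha c = true) →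
    aLoop cs tokens cur = tokens ++ pvE (cur ++ cs) := by
  induction cs with
  | nil =>
    intro tokens cur hall
    by_cases hne : cur = []
    · subst hne; simp [aLoop, pvE, pvRuns]
    · have he : pvE (cur ++ []) = [String.ofList cur] := by
        rw [pvE_alpha_prefix cur [] hne hall (by intro d hd; simp at hd)]
        simp [pvE, pvRuns]
      rw [aLoop, he]
      simp [hne]
  | cons c rest ih =>
    intro tokens cur hall
    by_cases hc : PySem.Chars.isalpha c = true
    · rw [aLoop]
      simp only [hc, if_true]
      rw [ih tokens (cur ++ [c]) (by
        intro x hx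
        rcases List.mem_append.mp hx with h | h
        · exact hall x h
        · simp at h; subst h; exact hc)]
      simp
    · have hc' : PySem.Chars.isalpha c = false := by
        cases h : PySem.Chars.isalpha c with
        | false => rfl
        | true => exact absurd h hc
      rw [aLoop]
      simp only [hc', Bool.false_eq_true, if_false]
      rw [ih _ [] (by intro x hx; simp at hx)]
      by_cases hne : cur = []
      · subst hne
        simp [pvE_not_alpha c rest hc']
      · rw [pvE_alpha_prefix cur (c :: rest) hne hall
          (by intro d hd; simp at hd; subst hd; exact hc'),
          pvE_not_alpha c rest hc']
        simp [hne]

-- B's inner while finds the end of the leading alpha run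
theorem bRunEnd_eq (s : List Char) (i : Nat) :
    bRunEnd s s.length i = i + ((s.drop i).takeWhile PySem.Chars.isalpha).length := by
  fun_induction bRunEnd s s.length i with
  | case1 j h ih =>
    obtain ⟨hj, ha⟩ := h
    have hdrop : s.drop j = s[j] :: s.drop (j + 1) := List.drop_eq_getElem_cons hj
    have hg : s.getD j ' ' = s[j] := List.getD_eq_getElem s ' ' hj
    rw [hdrop, List.takeWhile_cons, ← hg, ha]
    simp only [if_true]
    rw [ih]
    simp; omega
  | case2 j h =>
    by_cases hj : j < s.length
    · have ha : PySem.Chars.isalpha (s.getD j ' ') = false := by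
        cases hx : PySem.Chars.isalpha (s.getD j ' ') with
        | false => rfl
        | true => exact absurd ⟨hj, hx⟩ h
      have hdrop : s.drop j = s[j] :: s.drop (j + 1) := List.drop_eq_getElem_cons hj
      have hg : s.getD j ' ' = s[j] := List.getD_eq_getElem s ' ' hj
      rw [hdrop, List.takeWhile_cons, ← hg, ha]
      simp
    · have : s.drop j = [] := List.drop_eq_nil_of_le (by omega)
      simp [this]

theorem head?_dropWhile_isalpha (l : List Char) (d : Char)
    (h : (l.dropWhile PySem.Chars.isalpha).head? = some d) :
    PySem.Chars.isalpha d = false := by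
  induction l with
  | nil => simp [List.dropWhile] at h
  | cons c cs ih =>
    rw [List.dropWhile_cons] at h
    by_cases hc : PySem.Chars.isalpha c = true
    · rw [if_pos hc] at h; exact ih h
    · rw [if_neg hc] at h
      rw [List.head?_cons] at h
      injection h with h
      subst h
      simp only [Bool.not_eq_true] at hc
      exact hc

-- B's outer loop computes the normal form
theorem bGo_eq (s : List Char) : ∀ i, bGo s s.length i = pvE (s.drop i) := by
  intro i
  fun_induction bGo s s.length i with
  | case1 i hi ha ih =>
    set j := bRunEnd s s.length i with hjdef
    have hj : j = i + ((s.drop i).takeWhile PySem.Chars.isalpha).length :=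
      bRunEnd_eq s i
    have hdropi : s.drop i = s[i] :: s.drop (i + 1) := List.drop_eq_getElem_cons hi
    have hg : s.getD i ' ' = s[i] := List.getD_eq_getElem s ' ' hi
    set tw := (s.drop i).takeWhile PySem.Chars.isalpha with htw
    set dw := (s.drop i).dropWhile PySem.Chars.isalpha with hdw
    have hsplit : tw ++ dw = s.drop i := List.takeWhile_append_dropWhile
    have htake : (s.drop i).take (j - i) = tw := by
      rw [hj]
      simp only [Nat.add_sub_cancel_left]
      rw [← hsplit]
      exact List.take_left' rfl
    have hdropj : s.drop j = dw := by
      have h1 : s.drop j = (s.drop i).drop tw.length := by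
        rw [List.drop_drop, hj, Nat.add_comm, htw]
      rw [h1, ← hsplit]
      exact List.drop_left' rfl
    have hne : tw ≠ [] := by
      rw [htw, hdropi, List.takeWhile_cons, ← hg, ha]
      simp
    rw [htake, ih, hdropj]
    rw [← hsplit]
    rw [pvE_alpha_prefix tw dw hne (fun c hc => List.mem_takeWhile_imp hc)
      (fun d hd => head?_dropWhile_isalpha (s.drop i) d hd)]
  | case2 i hi ha ih =>
    have hdropi : s.drop i = s[i] :: s.drop (i + 1) := List.drop_eq_getElem_cons hi
    have hg : s.getD i ' ' = s[i] := List.getD_eq_getElem s ' ' hi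
    have ha' : PySem.Chars.isalpha (s.getD i ' ') = false := by
      cases hx : PySem.Chars.isalpha (s.getD i ' ') with
      | false => rfl
      | true => exact absurd hx ha
    rw [ih, hdropi, pvE_not_alpha _ _ (by rw [← hg]; exact ha'), hg]
  | case3 i hi =>
    have : s.drop i = [] := List.drop_eq_nil_of_le (by omega)
    simp [this, pvE, pvRuns]

-- ===== VERDICT (by name: the statement is the Claim_ definition above) =====
theorem tokenize_preserving_case_py_spec : Claim_equal_tokenize_preserving_case_py := by
  intro text _
  unfold Spec_tokenize_preserving_case_py tokenize_preserving_case_py tokenize_preserving_case_py_alt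
  rw [aLoop_eq text.toList [] [] (by intro c hc; simp at hc), bGo_eq text.toList 0]
  simp
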